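-- pv_equiv track=rewrite | github.com/Lijuan-Z/abalone_team5 | statespace/external.py | dict_to_out
-- ===== SOURCE A (Python) =====
-- def dict_to_out(board):
--     """WRITEME."""
--     out_str = ""
--
--     board_items = board.items()
--     blacks = list(filter(lambda item: item[1] == 0, board_items))
--     whites = list(filter(lambda item: item[1] == 1, board_items))
--     blacks.sort()
--     whites.sort()
--
--     all_marbles = blacks + whites
--     for coord, color in all_marbles:
--         out_str += f"{chr((coord // 10) + 64)}{coord % 10}{'b' if color == 0 else 'w'},"
--
--     return f"{out_str[:-1]}\n"
-- ===== SOURCE B (Python) =====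
-- def dict_to_out(board):
--     """WRITEME."""
--     tokens = []
--     for color in (0, 1):
--         pend = [coord for coord, col in board.items() if col == color]
--         while pend:
--             m = min(pend)
--             pend.remove(m)
--             tokens.append(f"{chr((m // 10) + 64)}{m % 10}{'b' if color == 0 else 'w'}")
--     return ",".join(tokens) + "\n"
-- ===== Notes on version B (the rewrite author's own statement) =====
-- stated objective: alternative
-- what changed: B never sorts: per color it collects the coordinates and emits tokens by repeated min()-extraction (min + remove from a pending list) into a token list joined once, replacing A's two filters, two list sorts, concatenation and trailing-comma trim.
import Mathlib
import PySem

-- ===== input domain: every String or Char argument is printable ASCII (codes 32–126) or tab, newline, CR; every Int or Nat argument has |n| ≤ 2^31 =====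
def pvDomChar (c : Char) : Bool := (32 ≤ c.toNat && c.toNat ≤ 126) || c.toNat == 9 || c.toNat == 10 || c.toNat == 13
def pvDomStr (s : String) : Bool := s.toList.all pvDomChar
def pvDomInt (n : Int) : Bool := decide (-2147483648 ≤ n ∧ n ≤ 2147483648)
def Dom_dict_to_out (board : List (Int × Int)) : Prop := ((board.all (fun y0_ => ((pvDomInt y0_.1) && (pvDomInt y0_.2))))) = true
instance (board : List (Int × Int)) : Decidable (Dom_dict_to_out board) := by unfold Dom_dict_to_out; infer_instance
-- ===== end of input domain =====

-- B never sorts: per color it emits tokens by repeated min()-extraction from the pending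
-- coordinate list and joins them once; return values proved equal on Pre_ (objective: alternative).

-- the f-string token f"{chr((coord // 10) + 64)}{coord % 10}{'b' if color == 0 else 'w'}"
-- (identical in both Python sources); Char.ofNat is exact for chr on Pre_-admitted coords
def pvTok (coord color : Int) : List Char :=
  Char.ofNat (PySem.Int.floordiv coord 10 + 64).toNat ::
    (PySem.Int.toChars (PySem.Int.mod coord 10) ++ [if color == 0 then 'b' else 'w'])

-- termination helper for the while-loop of B: pend.remove(min(pend)) shortens pend
theorem pv_remove_min_len {pend : List Int} {m : Int}
    (hm : PySem.List.min? pend (fun x => x) = some m) :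
    ((PySem.List.remove? pend m).getD []).length < pend.length := by
  have hmem := PySem.List.min?_mem hm
  rw [PySem.List.remove?_eq_some_erase pend m hmem, Option.getD_some,
    List.length_erase_of_mem hmem]
  have : 0 < pend.length := List.length_pos_of_mem hmem
  omega

-- ===== PORT A =====
def dict_to_out (board : List (Int × Int)) : String :=
  let items := (PySem.Dict.ofList board).items
  let blacks := PySem.List.sorted2 (items.filter (fun item => item.2 == 0)) Prod.fst Prod.snd
  let whites := PySem.List.sorted2 (items.filter (fun item => item.2 == 1)) Prod.fst Prod.snd
  let allMarbles := blacks ++ whites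
  let outStr := allMarbles.foldl (fun acc p => acc ++ (pvTok p.1 p.2 ++ [','])) ([] : List Char)
  String.ofList (PySem.List.slice outStr none (some (-1)) ++ ['\n'])

-- ===== PORT B =====
-- the 'while pend: m = min(pend); pend.remove(m); tokens.append(tok)' loop of Source B
def pvSelLoop (color : Int) (pend : List Int) : List (List Char) :=
  match hm : PySem.List.min? pend (fun x => x) with
  | none => []
  | some m => pvTok m color :: pvSelLoop color ((PySem.List.remove? pend m).getD [])
  termination_by pend.length
  decreasing_by exact pv_remove_min_len hm

def dict_to_out_alt (board : List (Int × Int)) : String :=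
  let items := (PySem.Dict.ofList board).items
  let tokens := [(0 : Int), 1].flatMap
    (fun color => pvSelLoop color ((items.filter (fun p => p.2 == color)).map Prod.fst))
  String.ofList (PySem.Chars.join [','] tokens ++ ['\n'])

-- ===== PRECONDITION & SPEC =====
-- Pre_ excludes marbles whose coord makes chr() raise ValueError (coord < -640 or > 11140479)
-- and the tiny band 552320..572799 where chr() yields a lone surrogate, a Python str that a
-- Lean String cannot represent (A and B return that same string there; see claim cites).
def Pre_dict_to_out (board : List (Int × Int)) : Prop :=
  ∀ p ∈ (PySem.Dict.ofList board).items, (p.2 = 0 ∨ p.2 = 1) →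
    (-640 ≤ p.1 ∧ p.1 ≤ 11140479 ∧ ¬(552320 ≤ p.1 ∧ p.1 ≤ 572799))
instance (board : List (Int × Int)) : Decidable (Pre_dict_to_out board) := by
  unfold Pre_dict_to_out; infer_instance
def pvWitness_dict_to_out : (List (Int × Int)) := [(21, 0), (35, 1), (22, 0), (40, 2)]
def Spec_dict_to_out (board : List (Int × Int)) (out : String) : Prop := out = dict_to_out_alt board
instance (board : List (Int × Int)) (out : String) : Decidable (Spec_dict_to_out board out) := by
  unfold Spec_dict_to_out; infer_instance

-- ===== CLAIM (what is proved, stated in full; the proofs are below) =====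
def Claim_equal_dict_to_out : Prop := ∀ (board : List (Int × Int)), Dom_dict_to_out board → Pre_dict_to_out board → Spec_dict_to_out board (dict_to_out board)

-- ===== LEMMAS AND PROOFS =====

-- one min-extraction step: sorted(pend) = min(pend) :: sorted(pend with that min removed)
theorem pv_sorted_cons_min {pend : List Int} {m : Int}
    (hm : PySem.List.min? pend (fun x => x) = some m) :
    PySem.List.sorted pend (fun x => x) = m :: PySem.List.sorted (pend.erase m) (fun x => x) := by
  have hmem := PySem.List.min?_mem hm
  apply PySem.List.sorted_id_eq_of_perm_of_pairwise
  · exact ((PySem.List.sorted_perm _ _ _).cons m).trans (List.perm_cons_erase hmem).symm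
  · refine List.pairwise_cons.mpr ⟨?_, ?_⟩
    · intro y hy
      exact PySem.List.min?_isMin hm y
        (List.mem_of_mem_erase ((PySem.List.mem_sorted _ _ _ _).mp hy))
    · exact PySem.List.sorted_pairwise (pend.erase m) (fun x => x)

-- B's extraction loop produces exactly the tokens of the sorted coordinate list
theorem pv_selLoop_eq (color : Int) (pend : List Int) :
    pvSelLoop color pend
      = (PySem.List.sorted pend (fun x => x)).map (fun m => pvTok m color) := by
  induction hn : pend.length using Nat.strong_induction_on generalizing pend with
  | _ n ih =>
    rw [pvSelLoop]
    split
    · next hm =>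
      rw [PySem.List.min?_eq_none_iff] at hm
      subst hm; simp [PySem.List.sorted]
    · next m hm =>
      have hmem := PySem.List.min?_mem hm
      rw [PySem.List.remove?_eq_some_erase pend m hmem, Option.getD_some,
        pv_sorted_cons_min hm, List.map_cons]
      have hlt : (pend.erase m).length < n := by
        rw [List.length_erase_of_mem hmem]
        have : 0 < pend.length := List.length_pos_of_mem hmem
        omega
      rw [ih _ hlt _ rfl]

-- sorted2 with keys k1, k2 is sorted with the lexicographic key toLex (k1 ·, k2 ·)
theorem pv_sorted2_eq_sorted (xs : List (Int × Int)) (k1 k2 : (Int × Int) → Int) :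
    PySem.List.sorted2 xs k1 k2 = PySem.List.sorted xs (fun a => toLex (k1 a, k2 a)) := by
  unfold PySem.List.sorted2
  rw [PySem.List.sorted_eq_foldl_insertBy]
  simp only [Bool.false_eq_true, if_false]
  congr 1
  funext acc x
  congr 1
  funext a b
  rw [Bool.eq_iff_iff]
  simp only [Bool.and_eq_true, Bool.or_eq_true, Bool.not_eq_true', decide_eq_true_eq,
    decide_eq_false_iff_not, Prod.Lex.lt_iff, ofLex_toLex]
  omega

-- A's sorted single-color block is the (·, c)-pairing of the sorted coordinate list
theorem pv_block_eq (items : List (Int × Int)) (c : Int)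
    (hnd : (items.map Prod.fst).Nodup) :
    PySem.List.sorted2 (items.filter (fun p => p.2 == c)) Prod.fst Prod.snd
      = (PySem.List.sorted ((items.filter (fun p => p.2 == c)).map Prod.fst)
          (fun x => x)).map (fun m => (m, c)) := by
  rw [pv_sorted2_eq_sorted]
  apply PySem.List.sorted_eq_of_perm_of_pairwise_lt
  · -- permutation: pairing back the sorted coords gives a rearrangement of the filtered pairs
    have h1 : ((items.filter (fun p => p.2 == c)).map Prod.fst).map (fun m => (m, c))
        = items.filter (fun p => p.2 == c) := by
      rw [List.map_map]
      apply List.map_congr_left ?_ |>.trans (List.map_id _)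
      intro p hp
      have := (List.mem_filter.mp hp).2
      simp only [beq_iff_eq] at this
      simp [Function.comp, ← this]
    refine ((PySem.List.sorted_perm ((items.filter (fun p => p.2 == c)).map Prod.fst)
      (fun x => x) false).map (fun m => (m, c))).trans ?_
    rw [h1]
  · -- strict increase: sorted distinct coords are strictly increasing, hence lex-increasing on (fst, snd)
    have hsub : ((items.filter (fun p => p.2 == c)).map Prod.fst).Nodup :=
      List.Nodup.sublist (List.Sublist.map Prod.fst List.filter_sublist) hnd
    have hnds : (PySem.List.sorted ((items.filter (fun p => p.2 == c)).map Prod.fst)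
        (fun x => x)).Nodup :=
      (PySem.List.sorted_perm _ _ _).nodup_iff.mpr hsub
    have hle := PySem.List.sorted_pairwise
      ((items.filter (fun p => p.2 == c)).map Prod.fst) (fun x => x)
    have hlt : (PySem.List.sorted ((items.filter (fun p => p.2 == c)).map Prod.fst)
        (fun x => x)).Pairwise (· < ·) :=
      (List.pairwise_and_iff.mpr ⟨hle, hnds⟩).imp (fun h => lt_of_le_of_ne h.1 h.2)
    rw [List.pairwise_map]
    refine hlt.imp ?_
    intro a b hab
    rw [Prod.Lex.lt_iff]
    exact Or.inl hab

-- dropping the final comma from the comma-terminated concatenation is a ','-join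
theorem pv_join_tokens (toks : List (List Char)) :
    (toks.flatMap (fun t => t ++ [','])).dropLast = PySem.Chars.join [','] toks := by
  induction toks with
  | nil => simp [PySem.Chars.join, List.intercalate]
  | cons t rest ih =>
    cases rest with
    | nil => simp [PySem.Chars.join_singleton]
    | cons r rs =>
      have hne : (r :: rs).flatMap (fun t => t ++ [',']) ≠ [] := by
        simp [List.flatMap_cons]
      rw [List.flatMap_cons, List.dropLast_append_of_ne_nil hne, ih,
        PySem.Chars.join_cons_cons]

theorem dict_to_out_eq (board : List (Int × Int)) :
    dict_to_out board = dict_to_out_alt board := by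
  have hnd : (((PySem.Dict.ofList board).items).map Prod.fst).Nodup := by
    have := PySem.Dict.nodup_keys_ofList board
    simpa [PySem.Dict.keys] using this
  simp only [dict_to_out, dict_to_out_alt,
    PySem.List.foldl_append_eq_flatMap (fun (p : Int × Int) => pvTok p.1 p.2 ++ [',']),
    PySem.List.slice_to_neg_one, List.nil_append]
  rw [← List.flatMap_map (fun (p : Int × Int) => pvTok p.1 p.2) (fun t => t ++ [',']), pv_join_tokens]
  congr 2
  rw [pv_block_eq _ 0 hnd, pv_block_eq _ 1 hnd]
  simp [List.flatMap_cons, pv_selLoop_eq, List.map_map, Function.comp_def]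

-- ===== VERDICT (by name: the statement is the Claim_ definition above) =====
theorem dict_to_out_spec : Claim_equal_dict_to_out := by
  intro board _ _
  unfold Spec_dict_to_out
  exact dict_to_out_eq board
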